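-- pv_equiv track=rewrite | github.com/tinkoff-ai/lb-sac | sweep.py | generate_sweep_commands
-- ===== SOURCE A (Python) =====
-- import itertools
-- from typing import List, Dict, Any, Optional
--
-- def generate_sweep_commands(
--         commands: List[str], sweep_config: Dict[str, List[Any]]
-- ) -> List[str]:
--     # simple grid search generation for now
--     sweep_grid = itertools.product(*list(sweep_config.values()))
--     sweep_keys = list(sweep_config.keys())
--
--     new_commands = []
--     for combination in sweep_grid:
--         suffix = [f"--{key} {str(value)}" for key, value in zip(sweep_keys, combination)]
--         for command in commands:
--             new_command = " ".join([command, *suffix])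
--             new_commands.append(new_command)
--
--     return new_commands
-- ===== SOURCE B (Python) =====
-- def generate_sweep_commands(commands, sweep_config):
--     # fold the grid one dimension at a time: partial suffix strings
--     suffixes = [""]
--     for key, values in sweep_config.items():
--         suffixes = [s + f" --{key} {value}" for s in suffixes for value in values]
--     return [command + s for s in suffixes for command in commands]
-- ===== Notes on version B (the rewrite author's own statement) =====
-- stated objective: alternative
-- what changed: Replaces itertools.product over all value lists plus a per-combination zip-and-join by a single fold over sweep_config that grows a list of partial suffix strings one dimension at a time, then concatenates each command with each finished suffix.
import Mathlib
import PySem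

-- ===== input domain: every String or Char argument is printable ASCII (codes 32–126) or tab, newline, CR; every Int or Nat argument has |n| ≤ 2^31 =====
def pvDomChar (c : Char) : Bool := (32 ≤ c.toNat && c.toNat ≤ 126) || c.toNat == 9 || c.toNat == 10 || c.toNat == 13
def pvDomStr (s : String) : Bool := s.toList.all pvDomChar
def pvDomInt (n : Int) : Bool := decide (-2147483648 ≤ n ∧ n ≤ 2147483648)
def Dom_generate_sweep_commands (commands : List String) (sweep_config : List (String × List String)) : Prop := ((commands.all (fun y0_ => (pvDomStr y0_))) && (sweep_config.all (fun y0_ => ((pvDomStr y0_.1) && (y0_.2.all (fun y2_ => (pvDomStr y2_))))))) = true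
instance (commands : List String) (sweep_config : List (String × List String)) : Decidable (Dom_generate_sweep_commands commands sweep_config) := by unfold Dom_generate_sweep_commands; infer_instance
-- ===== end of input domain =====

-- B replaces itertools.product + per-combination join by a single fold that grows
-- partial suffix strings one config dimension at a time (objective: alternative decomposition).

-- ===== PORT A =====
-- itertools.product(*lists): first factor varies slowest
def pyProduct : List (List String) → List (List String)
  | [] => [[]]
  | vs :: rest => vs.flatMap (fun v => (pyProduct rest).map (fun comb => v :: comb))

def generate_sweep_commands (commands : List String) (sweep_config : List (String × List String)) : List String :=
  let sweep_grid := pyProduct (sweep_config.map (fun kv => kv.2))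
  let sweep_keys := sweep_config.map (fun kv => kv.1)
  sweep_grid.foldl (fun new_commands combination =>
    let suffix := (sweep_keys.zip combination).map (fun kv => "--" ++ kv.1 ++ " " ++ kv.2)
    commands.foldl (fun acc command => acc ++ [PySem.Str.join " " (command :: suffix)]) new_commands) []

-- ===== PORT B =====
def generate_sweep_commands_alt (commands : List String) (sweep_config : List (String × List String)) : List String :=
  let suffixes := sweep_config.foldl
    (fun ps kv => ps.flatMap (fun s => kv.2.map (fun v => s ++ " --" ++ kv.1 ++ " " ++ v))) [""]
  suffixes.flatMap (fun s => commands.map (fun c => c ++ s))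

-- ===== PRECONDITION & SPEC =====
def Spec_generate_sweep_commands (commands : List String) (sweep_config : List (String × List String)) (out : List String) : Prop := out = generate_sweep_commands_alt commands sweep_config
instance (commands : List String) (sweep_config : List (String × List String)) (out : List String) : Decidable (Spec_generate_sweep_commands commands sweep_config out) := by unfold Spec_generate_sweep_commands; infer_instance

-- ===== CLAIM (what is proved, stated in full; the proofs are below) =====
def Claim_equal_generate_sweep_commands : Prop := ∀ (commands : List String) (sweep_config : List (String × List String)), Dom_generate_sweep_commands commands sweep_config → Spec_generate_sweep_commands commands sweep_config (generate_sweep_commands commands sweep_config)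

-- ===== LEMMAS AND PROOFS =====

-- the suffix strings B's fold produces, head dimension outermost
def sfxs : List (String × List String) → List String
  | [] => [""]
  | (k, vs) :: rest => vs.flatMap (fun v => (sfxs rest).map (fun t => " --" ++ k ++ " " ++ v ++ t))

theorem foldl_app_str (l : List String) : ∀ a : String,
    List.foldl (fun r s => r ++ s) a l = a ++ List.foldl (fun r s => r ++ s) "" l := by
  induction l with
  | nil => intro a; simp [List.foldl]
  | cons x xs ih => intro a; simp only [List.foldl, String.empty_append]
                    rw [ih (a ++ x), ih x, String.append_assoc]

theorem strJoin_cons (a : String) (l : List String) : String.join (a :: l) = a ++ String.join l := by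
  simp only [String.join, List.foldl, String.empty_append]; exact foldl_app_str l a

theorem pjoin_cons_cons (c p : String) (rest : List String) :
    PySem.Str.join " " (c :: p :: rest) = c ++ " " ++ PySem.Str.join " " (p :: rest) := by
  apply String.ext_iff.mpr
  have h := PySem.Str.toList_join " " (c :: p :: rest)
  have h2 := PySem.Str.toList_join " " (p :: rest)
  simp only [String.toList] at h h2
  simp [PySem.Chars.join_cons_cons]

theorem pjoin_single (c : String) : PySem.Str.join " " [c] = c := by
  apply String.ext_iff.mpr
  have h := PySem.Str.toList_join " " [c]
  simp only [String.toList] at h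
  simp [PySem.Chars.join_singleton]

-- " ".join([command, *suffix]) = command ++ concatenation of " "-prefixed parts
theorem pjoin_eq (parts : List String) : ∀ c : String,
    PySem.Str.join " " (c :: parts) = c ++ String.join (parts.map (fun p => " " ++ p)) := by
  induction parts with
  | nil => intro c; simp [pjoin_single, String.join]
  | cons p rest ih =>
      intro c
      rw [pjoin_cons_cons, ih p, List.map_cons, strJoin_cons]
      simp [String.append_assoc]

theorem sp_dashes (x : String) : (" " : String) ++ ("--" ++ x) = " --" ++ x := by
  rw [← String.append_assoc]
  have : (" " : String) ++ "--" = " --" := by decide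
  rw [this]

-- the mapped grid of joined suffixes IS B's suffix list
theorem grid_sfxs (cfg : List (String × List String)) :
    (pyProduct (cfg.map (fun kv => kv.2))).map (fun comb =>
      String.join ((((cfg.map (fun kv => kv.1)).zip comb).map
        (fun kv => "--" ++ kv.1 ++ " " ++ kv.2)).map (fun p => " " ++ p))) = sfxs cfg := by
  induction cfg with
  | nil => simp [pyProduct, sfxs, String.join]
  | cons kv rest ih =>
      obtain ⟨k, vs⟩ := kv
      simp only [List.map_cons, pyProduct, sfxs, List.map_flatMap, List.map_map]
      refine List.flatMap_congr (fun v _ => ?_)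
      rw [← ih, List.map_map]
      refine List.map_congr_left (fun comb _ => ?_)
      simp only [Function.comp, List.zip_cons_cons, List.map_cons, strJoin_cons,
        List.map_map, String.append_assoc]
      rw [sp_dashes]

-- B's fold over the config computes sfxs, each partial prefixed
theorem foldB (cfg : List (String × List String)) : ∀ ps : List String,
    cfg.foldl (fun ps kv => ps.flatMap (fun s => kv.2.map (fun v => s ++ " --" ++ kv.1 ++ " " ++ v))) ps
      = ps.flatMap (fun s => (sfxs cfg).map (fun t => s ++ t)) := by
  induction cfg with
  | nil => intro ps; simp [sfxs]
  | cons kv rest ih =>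
      obtain ⟨k, vs⟩ := kv
      intro ps
      simp only [List.foldl_cons, ih]
      simp [sfxs, List.flatMap_assoc, List.flatMap_map, List.map_flatMap, List.map_map,
            Function.comp_def, String.append_assoc]

-- ===== VERDICT (by name: the statement is the Claim_ definition above) =====
theorem generate_sweep_commands_spec : Claim_equal_generate_sweep_commands := by
  intro commands cfg _
  unfold Spec_generate_sweep_commands generate_sweep_commands generate_sweep_commands_alt
  rw [foldB cfg [""]]
  simp only [List.flatMap_cons, List.flatMap_nil, List.append_nil]
  have hfold : ∀ (grid : List (List String)) (acc : List String),
      grid.foldl (fun nc comb =>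
        commands.foldl (fun acc c => acc ++ [PySem.Str.join " " (c ::
          (((cfg.map (fun kv => kv.1)).zip comb).map (fun kv => "--" ++ kv.1 ++ " " ++ kv.2)))]) nc) acc
      = acc ++ grid.flatMap (fun comb => commands.map (fun c => PySem.Str.join " " (c ::
          (((cfg.map (fun kv => kv.1)).zip comb).map (fun kv => "--" ++ kv.1 ++ " " ++ kv.2))))) := by
    intro grid
    induction grid with
    | nil => intro acc; simp
    | cons comb rest ih =>
        intro acc
        rw [List.foldl_cons, PySem.List.foldl_append_singleton_eq_map, ih,
          List.flatMap_cons, List.append_assoc]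
  rw [hfold, List.nil_append, ← grid_sfxs cfg]
  simp only [List.flatMap_map, String.empty_append]
  refine List.flatMap_congr (fun comb _ => ?_)
  refine List.map_congr_left (fun c _ => ?_)
  rw [pjoin_eq]
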